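-- pv_equiv track=rewrite | github.com/alvaroserrrano/codingInterviewQuestions | sortingAndSearching/searchRange.py | doBinSearch
-- ===== SOURCE A (Python) =====
-- def doBinSearch(nums, target, isLeft):
--     left = 0
--     right = len(nums)
--     while (left < right):
--         middle = (left + right) // 2
--         if nums[middle] > target or (isLeft and target == nums[middle]):
--             right = middle
--         else:
--             left = middle + 1
--     return left
-- ===== SOURCE B (Python) =====
-- def doBinSearch(nums, target, isLeft):
--     # Recurse on (offset, window length) instead of an imperative (left, right) loop:
--     # a window of length n starting at lo splits at lo + n//2 into a prefix of
--     # length n//2 and a suffix of length n - n//2 - 1.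
--     def go(lo, n):
--         if n == 0:
--             return lo
--         half = n // 2
--         m = lo + half
--         if nums[m] > target or (isLeft and target == nums[m]):
--             return go(lo, half)
--         return go(m + 1, n - half - 1)
--     return go(0, len(nums))
-- ===== Notes on version B (the rewrite author's own statement) =====
-- stated objective: alternative
-- what changed: Replaced the imperative while-loop over Int bounds (left, right) with a recursive helper over (offset, window length): the window of length n splits at offset + n//2 into a prefix of length n//2 and a suffix of length n - n//2 - 1, with base case n == 0.
import Mathlib
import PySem

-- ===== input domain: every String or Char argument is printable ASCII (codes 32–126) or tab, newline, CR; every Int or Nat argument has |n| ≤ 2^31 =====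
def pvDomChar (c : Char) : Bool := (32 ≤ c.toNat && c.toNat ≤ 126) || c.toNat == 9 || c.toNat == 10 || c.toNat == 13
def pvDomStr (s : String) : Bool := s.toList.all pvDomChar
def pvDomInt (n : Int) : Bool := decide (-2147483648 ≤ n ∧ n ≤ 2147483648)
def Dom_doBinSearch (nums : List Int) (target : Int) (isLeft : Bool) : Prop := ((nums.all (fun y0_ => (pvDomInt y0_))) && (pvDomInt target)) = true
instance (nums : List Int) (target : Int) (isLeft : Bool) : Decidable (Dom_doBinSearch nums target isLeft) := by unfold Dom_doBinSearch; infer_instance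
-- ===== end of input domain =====

-- B replaces A's imperative while-loop over Int bounds (left, right) with a
-- recursive helper over (offset, window length); same probes, same result.

-- ===== PORT A =====
-- A's while-loop: state (left, right), iterated while left < right.
-- fuel only makes the recursion structural; nums.length + 1 iterations always
-- suffice because the window right - left strictly shrinks each pass.
def doBinSearchWhile (nums : List Int) (target : Int) (isLeft : Bool) :
    Nat → Int → Int → Int
  | 0, left, _ => left
  | fuel + 1, left, right =>
    if left < right then
      let middle := PySem.Int.floordiv (left + right) 2
      let v := (PySem.List.pyGet? nums middle).getD 0   -- nums[middle]; in range whenever 0 ≤ left < right ≤ len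
      if v > target || (isLeft && target == v) then
        doBinSearchWhile nums target isLeft fuel left middle
      else
        doBinSearchWhile nums target isLeft fuel (middle + 1) right
    else
      left

def doBinSearch (nums : List Int) (target : Int) (isLeft : Bool) : Int :=
  doBinSearchWhile nums target isLeft (nums.length + 1) 0 (nums.length : Int)

-- ===== PORT B =====
-- B's helper go (lo, n): recursion on the window LENGTH n (a Nat) at offset lo;
-- the split point is lo + n/2, the suffix window has length n - n/2 - 1.
def doBinSearchGo (nums : List Int) (target : Int) (isLeft : Bool)
    (lo : Nat) (n : Nat) : Nat :=
  match n with
  | 0 => lo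
  | Nat.succ k =>
    let half := (k + 1) / 2
    let m := lo + half
    let v := nums.getD m 0        -- nums[m]; m is in range on every call B makes
    if v > target || (isLeft && target == v) then
      doBinSearchGo nums target isLeft lo half
    else
      doBinSearchGo nums target isLeft (m + 1) (k - half)
  termination_by n
  decreasing_by all_goals omega

def doBinSearch_alt (nums : List Int) (target : Int) (isLeft : Bool) : Int :=
  (doBinSearchGo nums target isLeft 0 nums.length : Int)

-- ===== PRECONDITION & SPEC =====
def Spec_doBinSearch (nums : List Int) (target : Int) (isLeft : Bool) (out : Int) : Prop := out = doBinSearch_alt nums target isLeft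
instance (nums : List Int) (target : Int) (isLeft : Bool) (out : Int) : Decidable (Spec_doBinSearch nums target isLeft out) := by unfold Spec_doBinSearch; infer_instance

-- ===== CLAIM (what is proved, stated in full; the proofs are below) =====
def Claim_equal_doBinSearch : Prop := ∀ (nums : List Int) (target : Int) (isLeft : Bool), Dom_doBinSearch nums target isLeft → Spec_doBinSearch nums target isLeft (doBinSearch nums target isLeft)

-- ===== LEMMAS AND PROOFS =====
lemma mid_cast (lo s : Nat) :
    PySem.Int.floordiv ((lo : Int) + ((lo : Int) + (s : Int))) 2
      = ((lo + s / 2 : Nat) : Int) := by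
  have h : (lo : Int) + ((lo : Int) + (s : Int)) = ((2 * lo + s : Nat) : Int) := by
    push_cast; ring
  rw [h, show lo + s / 2 = (2 * lo + s) / 2 by omega]
  exact_mod_cast PySem.Int.floordiv_natCast (2 * lo + s) 2

lemma get_cast (nums : List Int) (lo s : Nat) :
    (PySem.List.pyGet? nums ((lo + s / 2 : Nat) : Int)).getD 0
      = nums.getD (lo + s / 2) 0 := by
  rw [PySem.List.pyGet?_natCast]
  simp [List.getD]

lemma while_eq_go (nums : List Int) (target : Int) (isLeft : Bool) :
    ∀ (s : Nat) (fuel : Nat) (lo : Nat), s ≤ fuel →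
      doBinSearchWhile nums target isLeft fuel (lo : Int) ((lo : Int) + (s : Int))
        = ((doBinSearchGo nums target isLeft lo s : Nat) : Int) := by
  intro s
  induction s using Nat.strong_induction_on with
  | _ s ih =>
    intro fuel lo hsf
    match s, fuel with
    | 0, fuel =>
      cases fuel with
      | zero => simp [doBinSearchWhile, doBinSearchGo]
      | succ f => simp [doBinSearchWhile, doBinSearchGo]
    | Nat.succ k, Nat.succ f =>
      have hlt : (lo : Int) < (lo : Int) + ((k + 1 : Nat) : Int) := by
        push_cast; omega
      rw [doBinSearchWhile, if_pos hlt, doBinSearchGo]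
      simp only [mid_cast lo (k + 1), get_cast nums lo (k + 1)]
      set half := (k + 1) / 2 with hhalf
      split
      · -- go left: window (lo, half)
        have : ((lo + half : Nat) : Int) = (lo : Int) + (half : Int) := by push_cast; ring
        rw [this]
        exact ih half (by omega) f lo (by omega)
      · -- go right: window (lo + half + 1, k - half)
        have harith : (lo : Int) + ((k + 1 : Nat) : Int)
            = ((lo + half + 1 : Nat) : Int) + ((k - half : Nat) : Int) := by
          have : half ≤ k := by omega
          push_cast [this]; omega
        have hm : ((lo + half : Nat) : Int) + 1 = ((lo + half + 1 : Nat) : Int) := by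
          push_cast; ring
        rw [harith, hm, ih (k - half) (by omega) f (lo + half + 1) (by omega)]

-- ===== VERDICT (by name: the statement is the Claim_ definition above) =====
theorem doBinSearch_spec : Claim_equal_doBinSearch := by
  intro nums target isLeft _
  unfold Spec_doBinSearch doBinSearch doBinSearch_alt
  have := while_eq_go nums target isLeft nums.length (nums.length + 1) 0 (by omega)
  simpa using this
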